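-- pv_equiv track=rewrite | github.com/kashastic/vibe_coding_orchestrator | orchestrator/orchestrator.py | _extract_final_codex_message
-- ===== SOURCE A (Python) =====
-- def _extract_final_codex_message(output: str) -> str:
--     marker = "\ncodex\n"
--     last_marker = output.lower().rfind(marker)
--     if last_marker == -1:
--         return ""
--
--     final_section = output[last_marker + len(marker) :]
--     stop_markers = ("\nfile update", "\nexec\n", "\napply_patch(", "\ntokens used")
--     stop_positions = [final_section.lower().find(stop_marker) for stop_marker in stop_markers]
--     valid_positions = [position for position in stop_positions if position != -1]
--     if valid_positions:
--         final_section = final_section[: min(valid_positions)]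
--     return final_section.strip()
-- ===== SOURCE B (Python) =====
-- def _extract_final_codex_message(output: str) -> str:
--     marker = "\ncodex\n"
--     low = output.lower()
--     last_marker = low.rfind(marker)
--     if last_marker == -1:
--         return ""
--     start = last_marker + len(marker)
--     stop_markers = ("\nfile update", "\nexec\n", "\napply_patch(", "\ntokens used")
--     # single left-to-right scan: stop at the leftmost position where any stop marker begins
--     end = len(output)
--     for i in range(start, len(output)):
--         if any(low.startswith(s, i) for s in stop_markers):
--             end = i
--             break
--     return output[start:end].strip()
-- ===== Notes on version B (the rewrite author's own statement) =====
-- stated objective: alternative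
-- what changed: Replaces the four separate lowercase find() scans plus list-filter-and-min with a single left-to-right scan from the section start that stops at the leftmost position where any stop marker begins (checked on the once-lowered whole string), slicing output[start:end] directly.
import Mathlib
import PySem

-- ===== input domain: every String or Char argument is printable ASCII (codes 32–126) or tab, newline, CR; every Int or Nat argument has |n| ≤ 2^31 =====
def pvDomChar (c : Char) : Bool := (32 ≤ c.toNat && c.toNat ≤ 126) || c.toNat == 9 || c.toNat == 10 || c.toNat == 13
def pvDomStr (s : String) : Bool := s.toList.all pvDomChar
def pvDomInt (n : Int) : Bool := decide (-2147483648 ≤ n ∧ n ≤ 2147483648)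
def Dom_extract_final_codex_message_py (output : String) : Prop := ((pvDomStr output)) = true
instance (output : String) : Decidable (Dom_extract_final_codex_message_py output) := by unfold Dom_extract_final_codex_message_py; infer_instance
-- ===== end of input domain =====

-- B replaces A's four independent lowercase find() scans + min with one left-to-right scan
-- that stops at the leftmost position where any stop marker begins (objective: alternative).

-- the stop-marker tuple, shared literal data of both programs
def pvStops : List (List Char) :=
  ["\nfile update".toList, "\nexec\n".toList, "\napply_patch(".toList, "\ntokens used".toList]

-- ===== PORT A =====
def extract_final_codex_message_py (output : String) : String :=
  let marker : List Char := "\ncodex\n".toList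
  let lastMarker : Int := PySem.Chars.rfind (PySem.Chars.lower output.toList) marker
  if lastMarker = -1 then ""
  else
    let finalSection : List Char := PySem.List.slice output.toList (some (lastMarker + (marker.length : Int)))
    let stopPositions : List Int := pvStops.map (fun sm => PySem.Chars.find (PySem.Chars.lower finalSection) sm)
    let validPositions : List Int := stopPositions.filter (fun p => p != -1)
    match PySem.List.min? validPositions (fun x => x) with
    | none => String.ofList (PySem.Chars.strip finalSection)
    | some m => String.ofList (PySem.Chars.strip (PySem.List.slice finalSection none (some m)))

-- ===== PORT B =====
-- scan of Source B's 'for i in range(start, len(output))' loop over the lowered suffix: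
-- index (relative to the suffix) of the first position where some stop marker begins
def pvScan : List Char → Option Nat
  | [] => none
  | c :: rest =>
      if pvStops.any (fun sm => sm.isPrefixOf (c :: rest)) then some 0
      else (pvScan rest).map (· + 1)

def extract_final_codex_message_py_alt (output : String) : String :=
  let marker : List Char := "\ncodex\n".toList
  let low : List Char := PySem.Chars.lower output.toList
  let lastMarker : Int := PySem.Chars.rfind low marker
  if lastMarker = -1 then ""
  else
    let start : Nat := (lastMarker + (marker.length : Int)).toNat
    let finalSection : List Char := output.toList.drop start
    match pvScan (low.drop start) with
    | none => String.ofList (PySem.Chars.strip finalSection)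
    | some i => String.ofList (PySem.Chars.strip (finalSection.take i))

-- ===== PRECONDITION & SPEC =====
def Spec_extract_final_codex_message_py (output : String) (out : String) : Prop := out = extract_final_codex_message_py_alt output
instance (output : String) (out : String) : Decidable (Spec_extract_final_codex_message_py output out) := by unfold Spec_extract_final_codex_message_py; infer_instance

-- ===== CLAIM (what is proved, stated in full; the proofs are below) =====
def Claim_equal_extract_final_codex_message_py : Prop := ∀ (output : String), Dom_extract_final_codex_message_py output → Spec_extract_final_codex_message_py output (extract_final_codex_message_py output)

-- ===== LEMMAS AND PROOFS =====

-- a stop marker begins at position j of t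
def pvHit (t : List Char) (j : Nat) : Prop := ∃ sm ∈ pvStops, sm <+: t.drop j

lemma pvHit_iff_any (t : List Char) (j : Nat) :
    pvHit t j ↔ pvStops.any (fun sm => sm.isPrefixOf (t.drop j)) = true := by
  simp [pvHit, List.any_eq_true, List.isPrefixOf_iff_prefix]

lemma pv_neg_one_le_rfind (s sub : List Char) : -1 ≤ PySem.Chars.rfind s sub := by
  unfold PySem.Chars.rfind
  generalize s.length = n
  induction n with
  | zero => rw [PySem.Chars.rfind.go]; split <;> omega
  | succ k ih => rw [PySem.Chars.rfind.go]; split <;> [omega; exact ih]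

lemma pvScan_none {t : List Char} (h : pvScan t = none) : ∀ j, ¬ pvHit t j := by
  induction t with
  | nil =>
      intro j
      simp [pvHit, pvStops]
  | cons c rest ih =>
      rw [pvScan] at h
      by_cases hc : pvStops.any (fun sm => sm.isPrefixOf (c :: rest)) = true
      · rw [if_pos hc] at h; exact absurd h (by simp)
      · rw [if_neg hc] at h
        intro j
        match j with
        | 0 =>
            rw [pvHit_iff_any]
            simpa using hc
        | Nat.succ j' =>
            have : pvScan rest = none := by
              cases hr : pvScan rest <;> simp [hr] at h ⊢
            simpa [pvHit] using ih this j'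

lemma pvScan_some {t : List Char} {i : Nat} (h : pvScan t = some i) :
    pvHit t i ∧ ∀ j < i, ¬ pvHit t j := by
  induction t generalizing i with
  | nil => simp [pvScan] at h
  | cons c rest ih =>
      rw [pvScan] at h
      by_cases hc : pvStops.any (fun sm => sm.isPrefixOf (c :: rest)) = true
      · rw [if_pos hc] at h
        have hi : i = 0 := by simpa using h.symm
        subst hi
        refine ⟨(pvHit_iff_any _ _).2 (by simpa using hc), by omega⟩
      · rw [if_neg hc] at h
        cases hr : pvScan rest with
        | none => simp [hr] at h
        | some i' =>
            have hii : i = i' + 1 := by simp [hr] at h; omega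
            subst hii
            obtain ⟨h1, h2⟩ := ih hr
            refine ⟨by simpa [pvHit] using h1, ?_⟩
            intro j hj
            match j with
            | 0 =>
                rw [pvHit_iff_any]
                simpa using hc
            | Nat.succ j' =>
                have := h2 j' (by omega)
                simpa [pvHit] using this

lemma pv_find_mem_valid {t sm : List Char} (hsm : sm ∈ pvStops) {j : Nat} (hpre : sm <+: t.drop j) :
    PySem.Chars.find t sm ∈ (pvStops.map (fun s => PySem.Chars.find t s)).filter (fun p => p != -1) := by
  have hin : PySem.Chars.isIn sm t = true :=
    (PySem.Chars.exists_prefix_drop_iff_isIn sm t).1 ⟨j, hpre⟩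
  have hne : PySem.Chars.find t sm ≠ -1 :=
    (PySem.Chars.find_ne_neg_one_iff t sm).2 ((PySem.Chars.isIn_iff_infix sm t).1 hin)
  simp only [List.mem_filter, List.mem_map]
  exact ⟨⟨sm, hsm, rfl⟩, by simpa using hne⟩

lemma pv_valid_nil_iff (t : List Char) :
    (pvStops.map (fun s => PySem.Chars.find t s)).filter (fun p => p != -1) = [] ↔ ∀ j, ¬ pvHit t j := by
  constructor
  · intro h j hhit
    obtain ⟨sm, hsm, hpre⟩ := hhit
    have := pv_find_mem_valid hsm hpre
    rw [h] at this
    exact absurd this (List.not_mem_nil)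
  · intro h
    rw [List.filter_eq_nil_iff]
    intro p hp
    obtain ⟨sm, hsm, rfl⟩ := List.mem_map.1 hp
    have : ¬ sm <:+: t := by
      intro hinf
      obtain ⟨j, hpre⟩ := (PySem.Chars.exists_prefix_drop_iff_isIn sm t).2
        ((PySem.Chars.isIn_iff_infix sm t).2 hinf)
      exact h j ⟨sm, hsm, hpre⟩
    simpa using (PySem.Chars.find_eq_neg_one_iff t sm).2 this

lemma pv_min_valid_spec {t : List Char} {m : Int}
    (h : PySem.List.min? ((pvStops.map (fun s => PySem.Chars.find t s)).filter (fun p => p != -1)) (fun x => x) = some m) :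
    0 ≤ m ∧ pvHit t m.toNat ∧ ∀ j < m.toNat, ¬ pvHit t j := by
  have hmem := PySem.List.min?_mem h
  rw [List.mem_filter] at hmem
  obtain ⟨hmap, hne⟩ := hmem
  obtain ⟨sm, hsm, hfind⟩ := List.mem_map.1 hmap
  have hne' : m ≠ -1 := by simpa using hne
  have hge : -1 ≤ m := hfind ▸ PySem.Chars.neg_one_le_find t sm
  have hm0 : 0 ≤ m := by omega
  have hspec := PySem.Chars.find_spec (s := t) (sub := sm) (by rw [hfind]; exact hm0)
  refine ⟨hm0, ⟨sm, hsm, by rw [← hfind]; exact hspec.1⟩, ?_⟩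
  intro j hj hhit
  obtain ⟨sm', hsm', hpre'⟩ := hhit
  have hvalid' := pv_find_mem_valid hsm' hpre'
  have hle : m ≤ PySem.Chars.find t sm' := PySem.List.min?_id_le h _ hvalid'
  have hf0 : 0 ≤ PySem.Chars.find t sm' := le_trans hm0 hle
  have hspec' := PySem.Chars.find_spec (s := t) (sub := sm') hf0
  have hfle : (PySem.Chars.find t sm').toNat ≤ j := by
    by_contra hlt
    exact hspec'.2 j (by omega) hpre'
  have : m.toNat ≤ (PySem.Chars.find t sm').toNat := by omega
  omega

lemma pv_lower_drop (l : List Char) (n : Nat) :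
    PySem.Chars.lower (l.drop n) = (PySem.Chars.lower l).drop n := by
  simp [PySem.Chars.lower, List.map_drop]

-- ===== VERDICT (by name: the statement is the Claim_ definition above) =====
theorem extract_final_codex_message_py_spec : Claim_equal_extract_final_codex_message_py := by
  intro output _
  unfold Spec_extract_final_codex_message_py
  unfold extract_final_codex_message_py extract_final_codex_message_py_alt
  simp only []
  set low := PySem.Chars.lower output.toList with hlow
  set marker : List Char := "\ncodex\n".toList with hmarker
  by_cases hlast : PySem.Chars.rfind low marker = -1
  · simp [hlast]
  · simp only [hlast, if_false]
    have hge : -1 ≤ PySem.Chars.rfind low marker := pv_neg_one_le_rfind low marker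
    set lastMarker := PySem.Chars.rfind low marker with hlm
    have h0 : 0 ≤ lastMarker + (marker.length : Int) := by
      have : lastMarker ≠ -1 := hlast
      have : (marker.length : Int) = 7 := by rw [hmarker]; decide
      omega
    set start : Nat := (lastMarker + (marker.length : Int)).toNat with hstart
    have hcast : lastMarker + (marker.length : Int) = (start : Int) := by
      rw [hstart]; omega
    have hslice : PySem.List.slice output.toList (some (lastMarker + (marker.length : Int)))
        = output.toList.drop start := by
      rw [hcast, PySem.List.slice_from_natCast]
    rw [hslice]
    set fs := output.toList.drop start with hfs
    have hlfs : PySem.Chars.lower fs = low.drop start := by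
      rw [hfs, hlow, pv_lower_drop]
    set t := low.drop start with ht
    rw [hlfs]
    cases hscan : pvScan t with
    | none =>
        have hnil : (pvStops.map (fun s => PySem.Chars.find t s)).filter (fun p => p != -1) = [] :=
          (pv_valid_nil_iff t).2 (pvScan_none hscan)
        rw [hnil]
        simp [PySem.List.min?]
    | some i =>
        obtain ⟨hhit, hmin⟩ := pvScan_some hscan
        obtain ⟨sm, hsm, hpre⟩ := hhit
        have hmem := pv_find_mem_valid hsm hpre
        have hnenil : (pvStops.map (fun s => PySem.Chars.find t s)).filter (fun p => p != -1) ≠ [] := by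
          intro h; rw [h] at hmem; exact absurd hmem (List.not_mem_nil)
        cases hmq : PySem.List.min? ((pvStops.map (fun s => PySem.Chars.find t s)).filter (fun p => p != -1)) (fun x => x) with
        | none => exact absurd ((PySem.List.min?_eq_none_iff _ _).1 hmq) hnenil
        | some m =>
            obtain ⟨hm0, hhitm, hminm⟩ := pv_min_valid_spec hmq
            have hieq : m.toNat = i := by
              by_contra hne
              rcases Nat.lt_or_ge m.toNat i with hlt | hge'
              · exact hmin m.toNat hlt hhitm
              · have : i < m.toNat := by omega
                exact hminm i this ⟨sm, hsm, hpre⟩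
            have hmi : m = (i : Int) := by omega
            rw [hmi]
            simp [PySem.List.slice_to_natCast]
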